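-- pv_equiv track=rewrite | github.com/Matt-London/Unique-Word-Counter | mods.py | maxIndexExc
-- ===== SOURCE A (Python) =====
-- def maxIndexExc(l, a):
-- 	maxNum = -1
-- 	maxInd = -1
-- 	count = 0
-- 	for x in l:
-- 		if x == a:
-- 			count += 1
-- 			continue
-- 		if x > maxNum:
-- 			maxNum = x
-- 			maxInd = count
-- 		count += 1
-- 	return(maxInd)
-- ===== SOURCE B (Python) =====
-- def maxIndexExc(l, a):
--     vals = [x for x in l if x != a]
--     if not vals:
--         return -1
--     return l.index(max(vals))
-- ===== Notes on version B (the rewrite author's own statement) =====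
-- stated objective: simpler
-- what changed: A's fused single scan tracking maxNum/maxInd/count is replaced by a two-phase computation: first compute the maximum of the values different from a, then locate its first occurrence with l.index; B tracks no index during the reduction.
-- intended difference: On lists whose elements other than a are all <= -1 (but at least one such element exists), A returns -1 because its running max starts at -1 and such elements can never beat it, while B returns the first index of the true maximum among elements != a, which is the intended 'index of max excluding a'. — e.g. on maxIndexExc([-5], 0): A returns -1, B returns 0
import Mathlib
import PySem

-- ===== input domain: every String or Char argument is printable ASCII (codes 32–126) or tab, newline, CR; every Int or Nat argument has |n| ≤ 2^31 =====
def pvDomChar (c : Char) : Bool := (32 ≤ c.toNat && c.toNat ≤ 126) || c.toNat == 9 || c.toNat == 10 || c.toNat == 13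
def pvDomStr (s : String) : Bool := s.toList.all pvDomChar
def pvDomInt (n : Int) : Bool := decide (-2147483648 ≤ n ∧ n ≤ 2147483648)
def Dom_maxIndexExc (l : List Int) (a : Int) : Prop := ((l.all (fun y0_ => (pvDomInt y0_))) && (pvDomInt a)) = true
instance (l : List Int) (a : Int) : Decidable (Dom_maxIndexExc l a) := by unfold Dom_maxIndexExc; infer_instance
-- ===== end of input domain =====

-- B replaces A's fused scan (maxNum/maxInd/count accumulators) by a two-phase
-- computation: max of the values ≠ a, then first index of that value; objective: simpler.

-- ===== PORT A =====
-- state = (maxNum, maxInd, count)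
def maxIndexExc (l : List Int) (a : Int) : Int :=
  let s := l.foldl (fun (st : Int × Int × Int) x =>
    if x == a then (st.1, st.2.1, st.2.2 + 1)
    else if x > st.1 then (x, st.2.2, st.2.2 + 1)
    else (st.1, st.2.1, st.2.2 + 1)) (-1, -1, 0)
  s.2.1

-- ===== PORT B =====
-- vals = [x for x in l if x != a]; if not vals: return -1; return l.index(max(vals))
def maxIndexExc_alt (l : List Int) (a : Int) : Int :=
  let vals := l.filter (fun x => x != a)
  match PySem.List.max? vals (fun y => y) with
  | none => -1
  | some m =>
      match PySem.List.index? l m with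
      | some k => (k : Int)
      | none => -1   -- unreachable: max(vals) is an element of l

-- ===== PRECONDITION & SPEC =====
-- On lists whose elements other than a are all ≤ -1 (but at least one such element exists),
-- A returns -1 (its running max starts at -1, so such elements never win), while B returns
-- the first index of the true maximum among elements ≠ a, the intended value.
def D_maxIndexExc (l : List Int) (a : Int) : Prop :=
  l.filter (fun x => x != a) ≠ [] ∧ ∀ x ∈ l, x ≠ a → x ≤ -1
instance (l : List Int) (a : Int) : Decidable (D_maxIndexExc l a) := by
  unfold D_maxIndexExc; infer_instance

def Spec_maxIndexExc (l : List Int) (a : Int) (out : Int) : Prop :=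
  ¬ D_maxIndexExc l a → out = maxIndexExc_alt l a
instance (l : List Int) (a : Int) (out : Int) : Decidable (Spec_maxIndexExc l a out) := by
  unfold Spec_maxIndexExc; infer_instance

def pvDiffWitness_maxIndexExc : List Int × Int := ([-5], 0)
def pvDiffWitnessOut_maxIndexExc : Int × Int := (-1, 0)

-- ===== CLAIM (what is proved, stated in full; the proofs are below) =====
def Claim_unchanged_maxIndexExc : Prop := ∀ (l : List Int) (a : Int), Dom_maxIndexExc l a → Spec_maxIndexExc l a (maxIndexExc l a)
def Claim_changed_maxIndexExc : Prop := Dom_maxIndexExc (pvDiffWitness_maxIndexExc.1) (pvDiffWitness_maxIndexExc.2) ∧ D_maxIndexExc (pvDiffWitness_maxIndexExc.1) (pvDiffWitness_maxIndexExc.2) ∧ maxIndexExc (pvDiffWitness_maxIndexExc.1) (pvDiffWitness_maxIndexExc.2) = pvDiffWitnessOut_maxIndexExc.1 ∧ maxIndexExc_alt (pvDiffWitness_maxIndexExc.1) (pvDiffWitness_maxIndexExc.2) = pvDiffWitnessOut_maxIndexExc.2 ∧ pvDiffWitnessOut_maxIndexExc.1 ≠ pvDiffWitnessOut_maxIndex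Exc.2
def Claim_exact_maxIndexExc : Prop := ∀ (l : List Int) (a : Int), Dom_maxIndexExc l a → D_maxIndexExc l a → maxIndexExc l a ≠ maxIndexExc_alt l a

-- ===== LEMMAS AND PROOFS =====

-- A's loop step, named for the proofs
def stepA (a : Int) (st : Int × Int × Int) (x : Int) : Int × Int × Int :=
  if x == a then (st.1, st.2.1, st.2.2 + 1)
  else if x > st.1 then (x, st.2.2, st.2.2 + 1)
  else (st.1, st.2.1, st.2.2 + 1)

-- characterisation of A's loop: starting from (num, ind, c) with -1 ≤ num, the returned
-- index is ind unless some element ≠ a beats num, in which case it is c + the position of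
-- the first occurrence of the maximum of the elements ≠ a.
lemma max_filter_mem {l : List Int} {a m : Int}
    (h : PySem.List.max? (l.filter (fun x => x != a)) (fun y => y) = some m) :
    m ∈ l ∧ m ≠ a := by
  have hm := PySem.List.max?_mem h
  rw [List.mem_filter] at hm
  exact ⟨hm.1, by simpa using hm.2⟩

-- running max distributes: foldl max (max x y) t = max x (foldl max y t)
lemma foldl_max_comm : ∀ (t : List Int) (x y : Int),
    t.foldl max (max x y) = max x (t.foldl max y) := by
  intro t
  induction t with
  | nil => intro x y; rfl
  | cons z t' ih =>
    intro x y
    simp only [List.foldl_cons, max_assoc]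
    exact ih x (max y z)

-- max? of a cons in terms of max? of the tail
lemma max?_id_cons_some {t : List Int} {x m' : Int}
    (h : PySem.List.max? t (fun y => y) = some m') :
    PySem.List.max? (x :: t) (fun y => y) = some (max x m') := by
  cases t with
  | nil => simp [PySem.List.max?] at h
  | cons y t' =>
    rw [PySem.List.max?_id_cons] at h ⊢
    have hm' : m' = t'.foldl max y := (by simpa using h : t'.foldl max y = m').symm
    subst hm'
    rw [List.foldl_cons, foldl_max_comm]

lemma foldA_char (a : Int) : ∀ (l : List Int) (num ind c : Int), -1 ≤ num →
    (l.foldl (stepA a) (num, ind, c)).2.1 =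
      match PySem.List.max? (l.filter (fun x => x != a)) (fun y => y) with
      | none => ind
      | some m => if num < m then c + ((PySem.List.index? l m).getD 0 : Int) else ind := by
  intro l
  induction l with
  | nil => intro num ind c _; simp [List.foldl, PySem.List.max?]
  | cons x xs ih =>
    intro num ind c hnum
    rw [List.foldl_cons]
    by_cases hxa : x = a
    · -- x is skipped by both the filter and the loop
      have hA : stepA a (num, ind, c) x = (num, ind, c + 1) := by simp [stepA, hxa]
      have hf : ((x != a) = true) = False := by simp [hxa]
      rw [hA, ih num ind (c + 1) hnum]
      simp only [List.filter_cons, hf]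
      simp only [if_false]
      cases hMxs : PySem.List.max? (xs.filter (fun y => y != a)) (fun y => y) with
      | none => rfl
      | some m =>
        have hm := max_filter_mem hMxs
        dsimp only
        by_cases hlt : num < m
        · have hne : x ≠ m := by rw [hxa]; exact fun h => hm.2 h.symm
          rw [PySem.List.index?_cons_of_ne xs hne]
          rcases Option.isSome_iff_exists.mp (Iff.mpr (PySem.List.index?_isSome_iff xs m) hm.1) with ⟨k, hk⟩
          simp only [hlt, if_true, hk, Option.map_some, Option.getD_some]
          push_cast; ring
        · simp [hlt]
    · have hf : ((x != a) = true) = True := by simp [hxa]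
      have hfc : (x :: xs).filter (fun y => y != a) = x :: xs.filter (fun y => y != a) := by
        simp [hxa]
      cases hMxs : PySem.List.max? (xs.filter (fun y => y != a)) (fun y => y) with
      | none =>
        -- no element of xs other than a: the max is x itself
        have hnil : xs.filter (fun y => y != a) = [] := Iff.mp (PySem.List.max?_eq_none_iff _ _) hMxs
        have hM : PySem.List.max? ((x :: xs).filter (fun y => y != a)) (fun y => y) = some x := by
          rw [hfc, hnil, PySem.List.max?_id_cons]; rfl
        rw [hM]
        by_cases hgt : x > num
        · have hA : stepA a (num, ind, c) x = (x, c, c + 1) := by simp [stepA, hxa, hgt]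
          rw [hA, ih x c (c + 1) (by omega), hMxs]
          dsimp only
          rw [PySem.List.index?_cons_self]
          simp only [Option.getD_some]
          rw [if_pos (by omega)]
          push_cast; ring
        · have hA : stepA a (num, ind, c) x = (num, ind, c + 1) := by
            simp [stepA, hxa]; omega
          rw [hA, ih num ind (c + 1) hnum, hMxs]
          dsimp only
          rw [if_neg (by omega)]
      | some m' =>
        have hm' := max_filter_mem hMxs
        have hM : PySem.List.max? ((x :: xs).filter (fun y => y != a)) (fun y => y)
            = some (max x m') := by rw [hfc]; exact max?_id_cons_some hMxs
        rw [hM]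
        by_cases hgt : x > num
        · have hA : stepA a (num, ind, c) x = (x, c, c + 1) := by simp [stepA, hxa, hgt]
          rw [hA, ih x c (c + 1) (by omega), hMxs]
          dsimp only
          by_cases hxm : x < m'
          · -- the max lives in the tail
            have hmax : max x m' = m' := by omega
            have hne : x ≠ m' := by omega
            rw [hmax, PySem.List.index?_cons_of_ne xs hne]
            rcases Option.isSome_iff_exists.mp (Iff.mpr (PySem.List.index?_isSome_iff xs m') hm'.1) with ⟨k, hk⟩
            rw [if_pos hxm, if_pos (by omega), hk]
            simp only [Option.map_some, Option.getD_some]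
            push_cast; ring
          · -- x itself is the max
            have hmax : max x m' = x := by omega
            rw [hmax, if_neg hxm, if_pos (by omega), PySem.List.index?_cons_self]
            simp
        · have hA : stepA a (num, ind, c) x = (num, ind, c + 1) := by
            simp [stepA, hxa]; omega
          rw [hA, ih num ind (c + 1) hnum, hMxs]
          dsimp only
          by_cases hlt : num < m'
          · have hmax : max x m' = m' := by omega
            have hne : x ≠ m' := by omega
            rw [hmax, PySem.List.index?_cons_of_ne xs hne]
            rcases Option.isSome_iff_exists.mp (Iff.mpr (PySem.List.index?_isSome_iff xs m') hm'.1) with ⟨k, hk⟩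
            rw [if_pos hlt, if_pos hlt, hk]
            simp only [Option.map_some, Option.getD_some]
            push_cast; ring
          · rw [if_neg hlt, if_neg (by omega)]

-- ===== VERDICT (by name: the statement is the Claim_ definition above) =====
theorem maxIndexExc_spec : Claim_unchanged_maxIndexExc := by
  intro l a _ hD
  unfold maxIndexExc maxIndexExc_alt
  have h := foldA_char a l (-1) (-1) 0 (by omega)
  have hstep : (fun (st : Int × Int × Int) (x : Int) =>
      if x == a then (st.1, st.2.1, st.2.2 + 1)
      else if x > st.1 then (x, st.2.2, st.2.2 + 1)
      else (st.1, st.2.1, st.2.2 + 1)) = stepA a := rfl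
  simp only [hstep, h]
  cases hmax : PySem.List.max? (l.filter (fun x => x != a)) (fun y => y) with
  | none => simp
  | some m =>
    have hm := max_filter_mem hmax
    have hpos : -1 < m := by
      by_contra hle
      apply hD
      constructor
      · intro hnil; rw [hnil] at hmax; simp [PySem.List.max?] at hmax
      · intro x hx hxa
        have := PySem.List.max?_isMax hmax x (List.mem_filter.mpr ⟨hx, by simpa using hxa⟩)
        omega
    rcases Option.isSome_iff_exists.mp (Iff.mpr (PySem.List.index?_isSome_iff l m) hm.1) with ⟨k, hk⟩
    simp only [hk]
    simp [hpos]

theorem maxIndexExc_changed : Claim_changed_maxIndexExc := by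
  unfold Claim_changed_maxIndexExc; decide

theorem maxIndexExc_tight : Claim_exact_maxIndexExc := by
  intro l a _ hD
  unfold maxIndexExc maxIndexExc_alt
  have h := foldA_char a l (-1) (-1) 0 (by omega)
  have hstep : (fun (st : Int × Int × Int) (x : Int) =>
      if x == a then (st.1, st.2.1, st.2.2 + 1)
      else if x > st.1 then (x, st.2.2, st.2.2 + 1)
      else (st.1, st.2.1, st.2.2 + 1)) = stepA a := rfl
  simp only [hstep, h]
  cases hmax : PySem.List.max? (l.filter (fun x => x != a)) (fun y => y) with
  | none => exact absurd (Iff.mp (PySem.List.max?_eq_none_iff _ _) hmax) hD.1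
  | some m =>
    have hm := max_filter_mem hmax
    have hle : m ≤ -1 := hD.2 m hm.1 hm.2
    rcases Option.isSome_iff_exists.mp (Iff.mpr (PySem.List.index?_isSome_iff l m) hm.1) with ⟨k, hk⟩
    simp only [hk]
    have hnlt : ¬ (-1 : Int) < m := by omega
    simp only [hnlt, if_false]
    intro hcontra
    omega
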